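-- pv_equiv track=rewrite | github.com/Shiteur/pychatbot-danjou-eid-c | fonction_generateur_de_reponse.py | Tokenisation_question
-- ===== SOURCE A (Python) =====
-- def Tokenisation_question(chaine):
--     chaine2=""
--     for j in range(len(chaine)):
--         if 65<=ord(chaine[j])<=90:
--             chaine2=chaine2+chr(ord(chaine[j])+32)
--         elif chaine[j] in "'()[]:!;,?.-_" or chaine[j]=='"':
--             if chaine[j]=="'"or chaine[j]=="-" :
--                 chaine2=chaine2+" "
--         else:
--             chaine2=chaine2+chaine[j]
--     return chaine2.split(" ")
-- ===== SOURCE B (Python) =====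
-- _TABLE = str.maketrans(
--     {chr(c): chr(c + 32) for c in range(65, 91)}
--     | {"'": " ", "-": " "}
--     | {ch: None for ch in "()[]:!;,?._\""}
-- )
--
-- def Tokenisation_question(chaine):
--     return chaine.translate(_TABLE).split(" ")
-- ===== Notes on version B (the rewrite author's own statement) =====
-- stated objective: idiomatic
-- what changed: Replaces the per-character if/elif accumulation loop with a single str.maketrans translation table (lowercase A-Z, apostrophe/hyphen to space, other punctuation deleted) applied by str.translate, then the same split on a space.
import Mathlib
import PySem

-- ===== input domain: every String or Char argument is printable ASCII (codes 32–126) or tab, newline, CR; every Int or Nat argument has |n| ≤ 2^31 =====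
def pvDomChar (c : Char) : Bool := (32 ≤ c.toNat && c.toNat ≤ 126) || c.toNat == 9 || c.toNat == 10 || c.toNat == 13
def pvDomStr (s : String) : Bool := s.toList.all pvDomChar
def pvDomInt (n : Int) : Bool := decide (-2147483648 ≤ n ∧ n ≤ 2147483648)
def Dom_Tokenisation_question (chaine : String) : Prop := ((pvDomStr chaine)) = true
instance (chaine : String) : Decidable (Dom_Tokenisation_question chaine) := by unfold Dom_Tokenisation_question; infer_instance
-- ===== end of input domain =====

-- B replaces A's per-character if/elif accumulation loop with one translation table
-- (uppercase→lowercase, ' and - → space, other punctuation deleted) applied in a single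
-- pass, then the same split on " ".

-- ===== PORT A =====
-- one iteration of A's loop body: what gets appended to chaine2 for the character c
def pvStepA (acc : List Char) (c : Char) : List Char :=
  if 65 ≤ c.toNat ∧ c.toNat ≤ 90 then
    acc ++ [Char.ofNat (c.toNat + 32)]
  else if PySem.Chars.isIn [c] "'()[]:!;,?.-_".toList ∨ c = '"' then
    (if c = '\'' ∨ c = '-' then acc ++ [' '] else acc)
  else
    acc ++ [c]

def Tokenisation_question (chaine : String) : List String :=
  let chaine2 := chaine.toList.foldl pvStepA []
  (PySem.Chars.splitOn chaine2 [' ']).map String.ofList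

-- ===== PORT B =====
-- the str.maketrans table: Char ↦ some replacement, or none = delete; absent keys kept
def pvTable : PySem.Dict Char (Option Char) :=
  let d := (PySem.List.pyRange 65 91 1).foldl
    (fun d n => d.insert (Char.ofNat n.toNat) (some (Char.ofNat (n.toNat + 32))))
    PySem.Dict.empty
  let d := (d.insert '\'' (some ' ')).insert '-' (some ' ')
  "()[]:!;,?._\"".toList.foldl (fun d ch => d.insert ch none) d

-- str.translate: per code point, replace / delete / keep
def pvTranslate (c : Char) : List Char :=
  match pvTable.get? c with
  | some (some r) => [r]
  | some none => []
  | none => [c]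

def Tokenisation_question_alt (chaine : String) : List String :=
  (PySem.Chars.splitOn (chaine.toList.flatMap pvTranslate) [' ']).map String.ofList

-- ===== PRECONDITION & SPEC =====
def Spec_Tokenisation_question (chaine : String) (out : List String) : Prop := out = Tokenisation_question_alt chaine
instance (chaine : String) (out : List String) : Decidable (Spec_Tokenisation_question chaine out) := by unfold Spec_Tokenisation_question; infer_instance

-- ===== CLAIM (what is proved, stated in full; the proofs are below) =====
def Claim_equal_Tokenisation_question : Prop := ∀ (chaine : String), Dom_Tokenisation_question chaine → Spec_Tokenisation_question chaine (Tokenisation_question chaine)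

-- ===== LEMMAS AND PROOFS =====

-- A's loop appends a per-character piece; the piece is exactly B's table result on Dom
lemma pvStepA_eq (c : Char) (h : pvDomChar c = true) (acc : List Char) :
    pvStepA acc c = acc ++ pvTranslate c := by
  have hlt : c.toNat < 127 := by
    simp only [pvDomChar, Bool.or_eq_true, Bool.and_eq_true, decide_eq_true_eq, beq_iff_eq] at h
    omega
  have key : ∀ n ∈ List.range 127,
      pvStepA [] (Char.ofNat n) = pvTranslate (Char.ofNat n) := by
    set_option maxRecDepth 4096 in decide
  have hc : Char.ofNat c.toNat = c := Char.ofNat_toNat c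
  have h0 : pvStepA [] c = pvTranslate c := by
    have := key c.toNat (List.mem_range.mpr hlt)
    rwa [hc] at this
  -- pvStepA acc c = acc ++ pvStepA [] c in every branch
  unfold pvStepA at h0 ⊢
  split_ifs at h0 ⊢ <;> simp_all

lemma pvFold_eq (cs : List Char) (h : cs.all pvDomChar = true) (acc : List Char) :
    cs.foldl pvStepA acc = acc ++ cs.flatMap pvTranslate := by
  induction cs generalizing acc with
  | nil => simp
  | cons c cs ih =>
    simp only [List.all_cons, Bool.and_eq_true] at h
    simp only [List.foldl_cons, List.flatMap_cons]
    rw [pvStepA_eq c h.1 acc, ih h.2, List.append_assoc]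

-- ===== VERDICT (by name: the statement is the Claim_ definition above) =====
theorem Tokenisation_question_spec : Claim_equal_Tokenisation_question := by
  intro chaine hdom
  unfold Spec_Tokenisation_question Tokenisation_question Tokenisation_question_alt
  rw [pvFold_eq _ hdom []]
  rfl
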